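-- pv_equiv track=rewrite | github.com/marcosnataqs/kameleondb | src/kameleondb/storage/dedicated.py | generate_table_name
-- ===== SOURCE A (Python) =====
-- def generate_table_name(entity_name: str) -> str:
--     """Generate dedicated table name for an entity.
--
--     Converts PascalCase/camelCase to snake_case.
--
--     Args:
--         entity_name: The entity name (e.g., "CustomerOrder")
--
--     Returns:
--         Table name (e.g., "kdb_customer_order")
--     """
--     # Convert PascalCase to snake_case
--     # This handles both regular words and acronyms
--     result = []
--     for i, char in enumerate(entity_name):
--         if char.isupper() and i > 0:
--             result.append("_")
--         result.append(char.lower())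
--     # Replace spaces/dashes with underscores, collapse multiple underscores
--     safe_name = "".join(result).replace(" ", "_").replace("-", "_")
--     # Collapse multiple consecutive underscores
--     while "__" in safe_name:
--         safe_name = safe_name.replace("__", "_")
--     return f"kdb_{safe_name}"
-- ===== SOURCE B (Python) =====
-- def generate_table_name(entity_name: str) -> str:
--     """Generate dedicated table name for an entity (single-pass version)."""
--     out = []
--     for i, char in enumerate(entity_name):
--         if char.isupper() and i > 0 and (not out or out[-1] != "_"):
--             out.append("_")
--         if char in " -_":
--             if not out or out[-1] != "_":
--                 out.append("_")
--         else:
--             out.append(char.lower())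
--     return "kdb_" + "".join(out)
-- ===== Notes on version B (the rewrite author's own statement) =====
-- stated objective: simpler
-- what changed: Replaced the build-then-postprocess pipeline (append-all loop, two .replace calls, a while loop repeatedly collapsing '__') by one left-to-right pass that never appends a second consecutive underscore, so no post-processing is needed.
import Mathlib
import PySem

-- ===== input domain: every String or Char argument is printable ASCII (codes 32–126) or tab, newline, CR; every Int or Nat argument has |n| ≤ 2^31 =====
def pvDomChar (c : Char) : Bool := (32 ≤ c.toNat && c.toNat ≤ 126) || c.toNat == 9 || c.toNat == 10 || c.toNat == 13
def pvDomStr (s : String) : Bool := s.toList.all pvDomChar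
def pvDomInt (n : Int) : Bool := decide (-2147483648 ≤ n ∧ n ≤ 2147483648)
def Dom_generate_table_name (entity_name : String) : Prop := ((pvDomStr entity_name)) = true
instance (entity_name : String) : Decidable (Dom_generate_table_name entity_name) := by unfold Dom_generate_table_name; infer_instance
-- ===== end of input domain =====

-- B replaces A's build-everything loop + two .replace calls + while-collapse loop by a single
-- left-to-right pass that never appends a second consecutive underscore (objective: simpler).

-- ===== PORT A =====
-- the `while "__" in safe_name:` loop; each iteration shortens the string, so
-- fuel = length + 1 is a pure totality guard that is never exhausted
def collapseA : Nat → List Char → List Char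
  | 0, s => s
  | fuel+1, s =>
    if PySem.Chars.isIn ['_', '_'] s then
      collapseA fuel (PySem.Chars.replace s ['_', '_'] ['_'])
    else s

def generate_table_name (entity_name : String) : String :=
  let result : List Char :=
    (PySem.List.enumerate entity_name.toList).foldl
      (fun acc ic =>
        let acc := if PySem.Chars.isupper ic.2 && decide (0 < ic.1) then acc ++ ['_'] else acc
        acc ++ [PySem.Chars.lowerChar ic.2]) []
  let safe_name := PySem.Chars.replace (PySem.Chars.replace result [' '] ['_']) ['-'] ['_']
  let safe_name := collapseA (safe_name.length + 1) safe_name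
  String.mk ('k' :: 'd' :: 'b' :: '_' :: safe_name)

-- ===== PORT B =====
def generate_table_name_alt (entity_name : String) : String :=
  let out : List Char :=
    (PySem.List.enumerate entity_name.toList).foldl
      (fun acc ic =>
        let c := ic.2
        let acc :=
          if PySem.Chars.isupper c && decide (0 < ic.1) && !(acc.getLast? == some '_') then
            acc ++ ['_']
          else acc
        if c == ' ' || c == '-' || c == '_' then
          if acc.getLast? == some '_' then acc else acc ++ ['_']
        else acc ++ [PySem.Chars.lowerChar c]) []
  String.mk ('k' :: 'd' :: 'b' :: '_' :: out)

-- ===== PRECONDITION & SPEC =====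
def Spec_generate_table_name (entity_name : String) (out : String) : Prop := out = generate_table_name_alt entity_name
instance (entity_name : String) (out : String) : Decidable (Spec_generate_table_name entity_name out) := by unfold Spec_generate_table_name; infer_instance

-- ===== CLAIM (what is proved, stated in full; the proofs are below) =====
def Claim_equal_generate_table_name : Prop := ∀ (entity_name : String), Dom_generate_table_name entity_name → Spec_generate_table_name entity_name (generate_table_name entity_name)

-- ===== LEMMAS AND PROOFS =====

-- one left-to-right scan of `s.replace("__", "_")`
def pvRep : List Char → List Char
  | [] => []
  | [c] => [c]
  | a :: b :: t => if a == '_' && b == '_' then '_' :: pvRep t else a :: pvRep (b :: t)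

-- underscore-squeeze with a flag "the previously emitted char was '_'"
def pvFc : Bool → List Char → List Char
  | _, [] => []
  | b, c :: t => if c == '_' && b then pvFc true t else c :: pvFc (c == '_') t

-- what one input char contributes after lowering and space/dash replacement
def pvTr (c : Char) : Char :=
  if c == ' ' || c == '-' then '_' else PySem.Chars.lowerChar c

-- the flat character stream A's first loop emits
def pvFlatA : List Char → Int → List Char
  | [], _ => []
  | c :: t, i =>
    ((if PySem.Chars.isupper c && decide (0 < i) then ['_'] else []) ++ [PySem.Chars.lowerChar c])
      ++ pvFlatA t (i + 1)

-- the same stream after the two single-char replaces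
def pvFlatB : List Char → Int → List Char
  | [], _ => []
  | c :: t, i =>
    ((if PySem.Chars.isupper c && decide (0 < i) then ['_'] else []) ++ [pvTr c])
      ++ pvFlatB t (i + 1)

-- B's guarded append: never a second consecutive underscore
def pvApp (acc : List Char) (c : Char) : List Char :=
  if c == '_' && acc.getLast? == some '_' then acc else acc ++ [c]

lemma pv_upper_toNat (c : Char) (h : PySem.Chars.isupper c = true) : 65 ≤ c.toNat ∧ c.toNat ≤ 90 := by
  simp [PySem.Chars.isupper, Char.le_def] at h
  exact h

lemma pv_lower_bounds (c : Char) (h : PySem.Chars.isupper c = true) :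
    97 ≤ (PySem.Chars.lowerChar c).toNat ∧ (PySem.Chars.lowerChar c).toNat ≤ 122 := by
  obtain ⟨h1, h2⟩ := pv_upper_toNat c h
  unfold PySem.Chars.lowerChar
  rw [if_pos h, Char.toNat_ofNat, if_pos (by left; omega)]
  omega

lemma pv_lower_notup (c : Char) (h : ¬ PySem.Chars.isupper c = true) : PySem.Chars.lowerChar c = c := by
  unfold PySem.Chars.lowerChar
  rw [if_neg h]

lemma pv_lower_ne (c d : Char) (hd : d.toNat < 97) (h : ¬ c = d) : ¬ PySem.Chars.lowerChar c = d := by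
  by_cases hu : PySem.Chars.isupper c = true
  · intro he
    have := pv_lower_bounds c hu
    rw [he] at this
    omega
  · rw [pv_lower_notup c hu]; exact h

lemma pv_go_nil (old new : List Char) (fuel : Nat) (acc : List Char) :
    PySem.Chars.replace.go old new fuel [] acc = acc.reverse := by
  cases fuel <;> simp [PySem.Chars.replace.go]

lemma pv_go_single (a b : Char) : ∀ (fuel : Nat) (l acc : List Char), l.length ≤ fuel →
    PySem.Chars.replace.go [a] [b] fuel l acc
      = acc.reverse ++ l.map (fun c => if c == a then b else c) := by
  intro fuel
  induction fuel with
  | zero => intro l acc h; simp at h; subst h; simp [pv_go_nil]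
  | succ n ih =>
    intro l acc h
    cases l with
    | nil => simp [pv_go_nil]
    | cons c t =>
      rw [PySem.Chars.replace.go]
      by_cases hc : c = a
      · subst hc
        rw [if_pos (by simp [List.isPrefixOf])]
        simp only [List.length_cons] at h
        simp only [List.length_cons, List.length_nil, List.drop_succ_cons, List.drop_zero,
          List.reverse_singleton, List.singleton_append]
        rw [ih t (b :: acc) (by omega)]
        simp
      · rw [if_neg (by simp [List.isPrefixOf]; exact fun hh => hc hh.symm)]
        simp only [List.length_cons] at h
        rw [ih t (c :: acc) (by omega)]
        simp [hc]

lemma pv_replace_single (s : List Char) (a b : Char) :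
    PySem.Chars.replace s [a] [b] = s.map (fun c => if c == a then b else c) := by
  unfold PySem.Chars.replace
  rw [if_neg (by simp)]
  rw [pv_go_single a b s.length s [] le_rfl]
  simp

lemma pv_go_double : ∀ (fuel : Nat) (l acc : List Char), l.length ≤ fuel →
    PySem.Chars.replace.go ['_','_'] ['_'] fuel l acc = acc.reverse ++ pvRep l := by
  intro fuel
  induction fuel with
  | zero => intro l acc h; simp at h; subst h; simp [pv_go_nil, pvRep]
  | succ n ih =>
    intro l acc h
    match l with
    | [] => simp [pv_go_nil, pvRep]
    | [c] =>
      rw [PySem.Chars.replace.go]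
      rw [if_neg (by simp [List.isPrefixOf])]
      rw [pv_go_nil]
      simp [pvRep]
    | a :: b :: t =>
      rw [PySem.Chars.replace.go]
      simp only [List.length_cons] at h
      by_cases hab : a = '_' ∧ b = '_'
      · obtain ⟨ha, hb⟩ := hab; subst ha; subst hb
        rw [if_pos (by simp [List.isPrefixOf])]
        simp only [List.length_cons, List.length_nil, List.drop_succ_cons, List.drop_zero,
          List.reverse_singleton, List.singleton_append]
        rw [ih t ('_' :: acc) (by omega)]
        simp [pvRep]
      · rw [if_neg (by simp [List.isPrefixOf]; intro h1 h2; exact hab ⟨h1.symm, h2.symm⟩)]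
        rw [ih (b :: t) (a :: acc) (by simp; omega)]
        rw [pvRep]
        rw [if_neg (by simp; intro h1 h2; exact hab ⟨h1, h2⟩)]
        simp

lemma pv_replace_double (s : List Char) :
    PySem.Chars.replace s ['_', '_'] ['_'] = pvRep s := by
  unfold PySem.Chars.replace
  rw [if_neg (by simp), pv_go_double s.length s [] le_rfl]
  simp

lemma pv_rep_len_le (s : List Char) : (pvRep s).length ≤ s.length := by
  induction s using pvRep.induct with
  | case1 => simp [pvRep]
  | case2 c => simp [pvRep]
  | case3 a b t h ih => simp only [pvRep, if_pos h]; simp at ih ⊢; omega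
  | case4 a b t h ih => simp only [pvRep, if_neg h]; simp at ih ⊢; omega

lemma pv_rep_len_lt (s : List Char) (h : ['_', '_'] <:+: s) : (pvRep s).length < s.length := by
  induction s using pvRep.induct with
  | case1 => simp at h
  | case2 c => have := h.length_le; simp at this
  | case3 a b t hc ih =>
    simp only [pvRep, if_pos hc]
    have := pv_rep_len_le t
    simp; omega
  | case4 a b t hc ih =>
    simp only [pvRep, if_neg hc]
    simp only [List.length_cons]
    have h' : ['_', '_'] <:+: b :: t := by
      rcases (List.infix_cons_iff).1 h with hp | hi
      · exfalso
        rcases List.cons_prefix_cons.1 hp with ⟨rfl, hp2⟩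
        rcases List.cons_prefix_cons.1 hp2 with ⟨rfl, _⟩
        simp at hc
      · exact hi
    have := ih h'
    simp only [List.length_cons] at this ⊢
    omega

lemma pv_fc_rep (s : List Char) : ∀ b, pvFc b (pvRep s) = pvFc b s := by
  induction s using pvRep.induct with
  | case1 => intro b; simp [pvRep]
  | case2 c => intro b; simp [pvRep]
  | case3 a b t h ih =>
    intro bb
    simp only [Bool.and_eq_true, beq_iff_eq] at h
    obtain ⟨rfl, rfl⟩ := h
    rw [pvRep, if_pos (by simp)]
    cases bb <;> simp [pvFc, ih]
  | case4 a b t h ih =>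
    intro bb
    rw [pvRep, if_neg h]
    rw [pvFc, pvFc]
    by_cases hc : (a == '_' && bb) = true
    · rw [if_pos hc, if_pos hc]
      exact ih true
    · rw [if_neg hc, if_neg hc, ih]

lemma pv_fc_id (s : List Char) : ∀ b, ¬ ['_', '_'] <:+: s →
    (b = true → s.head? ≠ some '_') → pvFc b s = s := by
  induction s with
  | nil => intro b _ _; simp [pvFc]
  | cons c t ih =>
    intro b hinf hb
    rw [pvFc]
    have hcb : ¬ (c == '_' && b) = true := by
      intro hh
      simp only [Bool.and_eq_true, beq_iff_eq] at hh
      exact hb hh.2 (by simp [hh.1])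
    rw [if_neg hcb]
    have hinft : ¬ ['_', '_'] <:+: t := fun hi => hinf ((List.infix_cons_iff).2 (Or.inr hi))
    congr 1
    apply ih _ hinft
    intro hcu
    simp only [beq_iff_eq] at hcu
    intro hhead
    apply hinf
    apply (List.infix_cons_iff).2
    left
    cases t with
    | nil => simp at hhead
    | cons d t' =>
      simp at hhead
      subst hcu; subst hhead
      simp [List.cons_prefix_cons]

lemma pv_collapse_eq (fuel : Nat) : ∀ s : List Char, s.length < fuel →
    collapseA fuel s = pvFc false s := by
  induction fuel with
  | zero => intro s h; omega
  | succ n ih =>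
    intro s h
    rw [collapseA]
    by_cases hin : PySem.Chars.isIn ['_', '_'] s = true
    · rw [if_pos hin, pv_replace_double]
      have hinf := (PySem.Chars.isIn_iff_infix _ _).1 hin
      have hlt := pv_rep_len_lt s hinf
      rw [ih (pvRep s) (by omega)]
      exact pv_fc_rep s false
    · rw [if_neg hin]
      have hfalse : PySem.Chars.isIn ['_', '_'] s = false := by
        revert hin; cases PySem.Chars.isIn ['_', '_'] s <;> simp
      have hinf := (PySem.Chars.isIn_eq_false_iff _ _).1 hfalse
      exact (pv_fc_id s false hinf (by simp)).symm

lemma pv_foldA (s : List Char) : ∀ (i : Int) (acc : List Char),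
    (PySem.List.enumerate s i).foldl
      (fun acc ic =>
        let acc := if PySem.Chars.isupper ic.2 && decide (0 < ic.1) then acc ++ ['_'] else acc
        acc ++ [PySem.Chars.lowerChar ic.2]) acc = acc ++ pvFlatA s i := by
  induction s with
  | nil => intro i acc; simp [PySem.List.enumerate, pvFlatA]
  | cons c t ih =>
    intro i acc
    rw [PySem.List.enumerate_cons, List.foldl_cons, ih, pvFlatA]
    simp only
    split <;> simp

lemma pv_map_flat (s : List Char) : ∀ i : Int,
    ((pvFlatA s i).map (fun c => if c == ' ' then '_' else c)).map
      (fun c => if c == '-' then '_' else c) = pvFlatB s i := by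
  induction s with
  | nil => intro i; simp [pvFlatA, pvFlatB]
  | cons c t ih =>
    intro i
    rw [pvFlatA, pvFlatB]
    simp only [List.map_append, ih]
    congr 1
    by_cases hsp : c = ' '
    · subst hsp; rw [pv_lower_notup _ (by decide)]
      split <;> simp [pvTr]
    · by_cases hda : c = '-'
      · subst hda; rw [pv_lower_notup _ (by decide)]
        split <;> simp [pvTr]
      · have h1 := pv_lower_ne c ' ' (by decide) hsp
        have h2 := pv_lower_ne c '-' (by decide) hda
        split <;> simp [pvTr, h1, h2, hsp, hda]

lemma pv_app_fold (l : List Char) : ∀ acc : List Char,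
    l.foldl pvApp acc = acc ++ pvFc (acc.getLast? == some '_') l := by
  induction l with
  | nil => intro acc; simp [pvFc]
  | cons c t ih =>
    intro acc
    rw [List.foldl_cons, pvFc, pvApp]
    by_cases hcu : c = '_'
    · subst hcu
      by_cases hend : acc.getLast? = some '_'
      · rw [if_pos (by simp [hend]), if_pos (by simp [hend]), ih, hend]
        simp
      · rw [if_neg (by simp [hend]), if_neg (by simp [hend]), ih]
        simp
    · rw [if_neg (by simp [hcu]), if_neg (by simp [hcu]), ih]
      simp

lemma pv_piece_char (c : Char) (acc : List Char) :
    (if c == ' ' || c == '-' || c == '_' then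
        if acc.getLast? == some '_' then acc else acc ++ ['_']
      else acc ++ [PySem.Chars.lowerChar c]) = pvApp acc (pvTr c) := by
  by_cases hm : (c == ' ' || c == '-' || c == '_') = true
  · rw [if_pos hm]
    have hm' : c = ' ' ∨ c = '-' ∨ c = '_' := by simpa [or_assoc] using hm
    have htr : pvTr c = '_' := by
      rcases hm' with h | h | h <;> subst h <;> rfl
    rw [htr, pvApp]
    by_cases hend : acc.getLast? = some '_'
    · rw [if_pos (by simp [hend]), if_pos (by simp [hend])]
    · rw [if_neg (by simp [hend]), if_neg (by simp [hend])]
  · rw [if_neg hm]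
    have hm3 : ¬ c = ' ' ∧ ¬ c = '-' ∧ ¬ c = '_' := by simpa [or_assoc, not_or] using hm
    obtain ⟨h1, h2, h3⟩ := hm3
    have htr : pvTr c = PySem.Chars.lowerChar c := by
      rw [pvTr, if_neg (by simp [h1, h2])]
    rw [htr, pvApp, if_neg (by simp; intro h; exact absurd h (pv_lower_ne c '_' (by decide) h3))]

lemma pv_foldB (s : List Char) : ∀ (i : Int) (acc : List Char),
    (PySem.List.enumerate s i).foldl
      (fun acc ic =>
        let c := ic.2
        let acc :=
          if PySem.Chars.isupper c && decide (0 < ic.1) && !(acc.getLast? == some '_') then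
            acc ++ ['_']
          else acc
        if c == ' ' || c == '-' || c == '_' then
          if acc.getLast? == some '_' then acc else acc ++ ['_']
        else acc ++ [PySem.Chars.lowerChar c]) acc = (pvFlatB s i).foldl pvApp acc := by
  induction s with
  | nil => intro i acc; simp [PySem.List.enumerate, pvFlatB]
  | cons c t ih =>
    intro i acc
    rw [PySem.List.enumerate_cons, List.foldl_cons, ih, pvFlatB, List.foldl_append]
    congr 1
    by_cases hsep : (PySem.Chars.isupper c && decide (0 < i)) = true
    · rw [if_pos hsep]
      have hstep : (if (PySem.Chars.isupper c && decide (0 < i) && !(acc.getLast? == some '_')) = true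
          then acc ++ ['_'] else acc) = pvApp acc '_' := by
        rw [pvApp]
        by_cases hend : acc.getLast? = some '_'
        · rw [if_neg (by simp [hsep, hend]), if_pos (by simp [hend])]
        · rw [if_pos (by simp [hsep, hend]), if_neg (by simp [hend])]
      calc (fun acc (ic : Int × Char) =>
              let c := ic.2;
              let acc :=
                if PySem.Chars.isupper c && decide (0 < ic.1) && !(acc.getLast? == some '_') then acc ++ ['_']
                else acc;
              if c == ' ' || c == '-' || c == '_' then
                if acc.getLast? == some '_' then acc else acc ++ ['_']
              else acc ++ [PySem.Chars.lowerChar c]) acc (i, c)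
          = (if c == ' ' || c == '-' || c == '_' then
                if (pvApp acc '_').getLast? == some '_' then pvApp acc '_' else pvApp acc '_' ++ ['_']
              else pvApp acc '_' ++ [PySem.Chars.lowerChar c]) := by
            simp only [hstep]
        _ = pvApp (pvApp acc '_') (pvTr c) := pv_piece_char c (pvApp acc '_')
        _ = List.foldl pvApp acc (['_'] ++ [pvTr c]) := by
            simp [List.foldl_cons]
    · rw [if_neg hsep]
      have hstep : (if (PySem.Chars.isupper c && decide (0 < i) && !(acc.getLast? == some '_')) = true
          then acc ++ ['_'] else acc) = acc := by
        rw [if_neg (by simp only [Bool.and_eq_true] at hsep ⊢; tauto)]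
      calc (fun acc (ic : Int × Char) =>
              let c := ic.2;
              let acc :=
                if PySem.Chars.isupper c && decide (0 < ic.1) && !(acc.getLast? == some '_') then acc ++ ['_']
                else acc;
              if c == ' ' || c == '-' || c == '_' then
                if acc.getLast? == some '_' then acc else acc ++ ['_']
              else acc ++ [PySem.Chars.lowerChar c]) acc (i, c)
          = (if c == ' ' || c == '-' || c == '_' then
                if acc.getLast? == some '_' then acc else acc ++ ['_']
              else acc ++ [PySem.Chars.lowerChar c]) := by
            simp only [hstep]
        _ = pvApp acc (pvTr c) := pv_piece_char c acc
        _ = List.foldl pvApp acc ([] ++ [pvTr c]) := by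
            simp [List.foldl_cons]

-- ===== VERDICT (by name: the statement is the Claim_ definition above) =====
theorem generate_table_name_spec : Claim_equal_generate_table_name := by
  intro s _
  unfold Spec_generate_table_name generate_table_name generate_table_name_alt
  simp only [pv_foldA, pv_foldB, List.nil_append, pv_replace_single, pv_map_flat, pv_app_fold]
  rw [pv_collapse_eq _ _ (by omega)]
  simp
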